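-- pv_equiv track=rewrite | github.com/pcantalupo/bioSkills | comparative-genomics/hgt-detection/examples/hgt_detection.py | identify_genomic_islands
-- ===== SOURCE A (Python) =====
-- def identify_genomic_islands(gene_annotations, max_gap=10000, min_genes=3):
--     '''Cluster anomalous genes into genomic islands
--
--     Parameters:
--     - max_gap: Maximum distance between genes to cluster
--     - min_genes: Minimum genes to call an island
--
--     Islands often contain:
--     - Mobile elements (integrases, transposases)
--     - Pathogenicity/fitness genes
--     - Antibiotic resistance genes
--     '''
--     # Sort by position
--     sorted_genes = sorted(gene_annotations, key=lambda x: x.get('start', 0))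
--
--     islands = []
--     current_island = []
--
--     for gene in sorted_genes:
--         if not gene.get('anomalous', False):
--             if current_island and len(current_island) >= min_genes:
--                 islands.append(current_island)
--             current_island = []
--             continue
--
--         if not current_island:
--             current_island = [gene]
--         elif gene['start'] - current_island[-1].get('end', 0) <= max_gap:
--             current_island.append(gene)
--         else:
--             if len(current_island) >= min_genes:
--                 islands.append(current_island)
--             current_island = [gene]
--
--     if current_island and len(current_island) >= min_genes:
--         islands.append(current_island)
--
--     return islands
-- ===== SOURCE B (Python) =====
-- def identify_genomic_islands(gene_annotations, max_gap=10000, min_genes=3):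
--     """Boundary-index formulation: compute every cluster boundary position in one
--     pairwise pass over the position-sorted genes, then materialize islands as
--     slices between consecutive boundaries and keep the anomalous, large-enough ones."""
--     s = sorted(gene_annotations, key=lambda x: x.get('start', 0))
--
--     def boundary(prev, gene):
--         if not (prev.get('anomalous', False) and gene.get('anomalous', False)):
--             return True
--         return gene['start'] - prev.get('end', 0) > max_gap
--
--     bounds = [0] + [i + 1 for i, (p, g) in enumerate(zip(s, s[1:])) if boundary(p, g)] + [len(s)]
--     return [s[a:b] for a, b in zip(bounds, bounds[1:])
--             if a < b and s[a].get('anomalous', False) and b - a >= min_genes]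
-- ===== Notes on version B (the rewrite author's own statement) =====
-- stated objective: alternative
-- what changed: B replaces A's stateful accumulation loop (growing a current_island and flushing it inline) by a boundary-index formulation: one pairwise pass over adjacent sorted genes computes the list of cluster boundary positions, islands are then materialized as list slices between consecutive boundaries and filtered by anomalous-head and min_genes.
import Mathlib
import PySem

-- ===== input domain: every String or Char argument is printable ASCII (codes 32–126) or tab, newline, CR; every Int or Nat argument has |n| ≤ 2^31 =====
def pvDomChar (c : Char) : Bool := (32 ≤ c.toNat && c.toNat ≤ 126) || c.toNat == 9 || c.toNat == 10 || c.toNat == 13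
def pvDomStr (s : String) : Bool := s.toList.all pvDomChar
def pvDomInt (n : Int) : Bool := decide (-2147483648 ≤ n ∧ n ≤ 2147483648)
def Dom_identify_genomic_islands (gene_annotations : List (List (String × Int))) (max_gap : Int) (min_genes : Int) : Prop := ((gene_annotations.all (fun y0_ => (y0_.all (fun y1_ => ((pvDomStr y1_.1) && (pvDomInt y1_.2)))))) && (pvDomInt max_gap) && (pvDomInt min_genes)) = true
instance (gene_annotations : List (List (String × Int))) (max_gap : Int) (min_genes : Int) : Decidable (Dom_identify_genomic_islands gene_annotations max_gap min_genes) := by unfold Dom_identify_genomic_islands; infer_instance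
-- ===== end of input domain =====

-- B replaces A's stateful accumulation loop by a boundary-index formulation (pairwise pass
-- computing boundary positions, islands materialized as slices, filtered at the end); objective: alternative.


-- shared small helpers (dict.get with default, truthiness of 'anomalous', end of last gene of a cluster)
def pvGet (g : List (String × Int)) (k : String) (d : Int) : Int :=
  PySem.Dict.getD (PySem.Dict.mk g) k d

def pvAnom (g : List (String × Int)) : Bool :=
  pvGet g "anomalous" 0 != 0

-- current_island[-1].get('end', 0); the 0-for-[] default is never reached: A only asks it on a nonempty cluster
def pvLastEnd (c : List (List (String × Int))) : Int :=
  match c.getLast? with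
  | some g => pvGet g "end" 0
  | none => 0

-- ===== PORT A =====
-- loop body of A; gene['start'] is ported as pvGet gene "start" 0: Pre_ guarantees the key is present there (KeyError excluded)
def pvStepA (max_gap min_genes : Int)
    (st : List (List (List (String × Int))) × List (List (String × Int)))
    (gene : List (String × Int)) :
    List (List (List (String × Int))) × List (List (String × Int)) :=
  if pvAnom gene = false then
    ((if st.2 ≠ [] ∧ min_genes ≤ (st.2.length : Int) then st.1 ++ [st.2] else st.1), [])
  else if st.2 = [] then (st.1, [gene])
  else if pvGet gene "start" 0 - pvLastEnd st.2 ≤ max_gap then (st.1, st.2 ++ [gene])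
  else ((if min_genes ≤ (st.2.length : Int) then st.1 ++ [st.2] else st.1), [gene])

def identify_genomic_islands (gene_annotations : List (List (String × Int))) (max_gap : Int) (min_genes : Int) : List (List (List (String × Int))) :=
  let sorted_genes := PySem.List.sorted gene_annotations (fun x => pvGet x "start" 0)
  let st := sorted_genes.foldl (pvStepA max_gap min_genes) ([], [])
  if st.2 ≠ [] ∧ min_genes ≤ (st.2.length : Int) then st.1 ++ [st.2] else st.1

-- ===== PORT B =====
-- boundary(prev, gene) of Source B; gene['start'] ported as pvGet gene "start" 0 as in A (Pre_ covers the KeyError)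
def pvBrk (max_gap : Int) (p g : List (String × Int)) : Bool :=
  if !(pvAnom p && pvAnom g) then true
  else decide (max_gap < pvGet g "start" 0 - pvGet p "end" 0)

def identify_genomic_islands_alt (gene_annotations : List (List (String × Int))) (max_gap : Int) (min_genes : Int) : List (List (List (String × Int))) :=
  let s := PySem.List.sorted gene_annotations (fun x => pvGet x "start" 0)
  -- bounds = [0] + [i + 1 for i, (p, g) in enumerate(zip(s, s[1:])) if boundary(p, g)] + [len(s)]
  let bounds : List Int :=
    [0] ++ ((PySem.List.enumerate (s.zip (PySem.List.slice s (some 1) none))).filter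
        (fun x => pvBrk max_gap x.2.1 x.2.2)).map (fun x => x.1 + 1) ++ [(s.length : Int)]
  -- [s[a:b] for a, b in zip(bounds, bounds[1:]) if a < b and s[a].get('anomalous', False) and b - a >= min_genes]
  ((bounds.zip bounds.tail).filter (fun ab =>
      decide (ab.1 < ab.2) && pvAnom (PySem.List.pyGetD s ab.1 []) && decide (min_genes ≤ ab.2 - ab.1))).map
    (fun ab => PySem.List.slice s (some ab.1) (some ab.2))

-- ===== PRECONDITION & SPEC =====
-- Pre_ excludes exactly the KeyError of gene['start'] (reached identically by both programs): an anomalous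
-- gene that directly follows another anomalous gene in the position-sorted order and has no 'start' key.
def Pre_identify_genomic_islands (gene_annotations : List (List (String × Int))) (max_gap : Int) (min_genes : Int) : Prop :=
  ∀ p ∈ (PySem.List.sorted gene_annotations (fun x => pvGet x "start" 0)).zip
        (PySem.List.sorted gene_annotations (fun x => pvGet x "start" 0)).tail,
    pvAnom p.1 = true → pvAnom p.2 = true → (PySem.Dict.mk p.2).contains "start" = true
instance (gene_annotations : List (List (String × Int))) (max_gap : Int) (min_genes : Int) : Decidable (Pre_identify_genomic_islands gene_annotations max_gap min_genes) := by unfold Pre_identify_genomic_islands; infer_instance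

def pvWitness_identify_genomic_islands : (List (List (String × Int))) × Int × Int :=
  ([[("start", 1), ("end", 3), ("anomalous", 1)],
    [("start", 5), ("end", 8), ("anomalous", 1)],
    [("start", 20)]], 10000, 2)

def Spec_identify_genomic_islands (gene_annotations : List (List (String × Int))) (max_gap : Int) (min_genes : Int) (out : List (List (List (String × Int)))) : Prop := out = identify_genomic_islands_alt gene_annotations max_gap min_genes
instance (gene_annotations : List (List (String × Int))) (max_gap : Int) (min_genes : Int) (out : List (List (List (String × Int)))) : Decidable (Spec_identify_genomic_islands gene_annotations max_gap min_genes out) := by unfold Spec_identify_genomic_islands; infer_instance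

-- ===== CLAIM (what is proved, stated in full; the proofs are below) =====
def Claim_equal_identify_genomic_islands : Prop := ∀ (gene_annotations : List (List (String × Int))) (max_gap : Int) (min_genes : Int), Dom_identify_genomic_islands gene_annotations max_gap min_genes → Pre_identify_genomic_islands gene_annotations max_gap min_genes → Spec_identify_genomic_islands gene_annotations max_gap min_genes (identify_genomic_islands gene_annotations max_gap min_genes)

-- ===== LEMMAS AND PROOFS =====

-- reference clustering: all candidate clusters of the list, with pending cluster `pending`
def pvRef (mg : Int) : List (List (String × Int)) → List (List (String × Int)) → List (List (List (String × Int)))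
  | pending, [] => if pending = [] then [] else [pending]
  | pending, g :: t =>
    if pvAnom g = false then
      (if pending = [] then pvRef mg [] t else pending :: pvRef mg [] t)
    else if pending = [] then pvRef mg [g] t
    else if pvGet g "start" 0 - pvLastEnd pending ≤ mg then pvRef mg (pending ++ [g]) t
    else pending :: pvRef mg [g] t

-- A's loop (with final flush) computes the length-filtered reference clusters
theorem pvA_ref (mg mn : Int) (s : List (List (String × Int))) :
    ∀ islands cur,
      (let st := s.foldl (pvStepA mg mn) (islands, cur)
       if st.2 ≠ [] ∧ mn ≤ (st.2.length : Int) then st.1 ++ [st.2] else st.1)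
      = islands ++ (pvRef mg cur s).filter (fun c => decide (mn ≤ (c.length : Int))) := by
  induction s with
  | nil =>
    intro islands cur
    by_cases hc : cur = [] <;> simp [pvRef, hc] <;> split_ifs <;> simp_all
  | cons g t ih =>
    intro islands cur
    simp only [List.foldl_cons]
    cases ha : pvAnom g with
    | false =>
      by_cases hc : cur = []
      · simpa [pvStepA, ha, hc, pvRef] using ih islands []
      · simp only [pvStepA, ha, hc, pvRef, if_true, if_false]
        rw [ih _ []]
        by_cases hp : mn ≤ (cur.length : Int) <;>
          simp [hp, hc, List.append_assoc]
    | true =>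
      by_cases hc : cur = []
      · simpa [pvStepA, ha, hc, pvRef] using ih islands [g]
      · by_cases hgap : pvGet g "start" 0 - pvLastEnd cur ≤ mg
        · simpa [pvStepA, ha, hc, hgap, pvRef] using ih islands (cur ++ [g])
        · simp only [pvStepA, ha, hc, hgap, pvRef, Bool.true_eq_false, if_false]
          rw [ih _ [g]]
          by_cases hp : mn ≤ (cur.length : Int) <;>
            simp [hp, List.append_assoc]

-- head-of-cluster anomaly test (the 's[a].get('anomalous')' part of B's filter, on the slice)
def pvHeadAnom : List (List (String × Int)) → Bool
  | [] => false
  | h :: _ => pvAnom h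

-- B-side reference segmentation: split at every boundary, keeping every segment
def pvSegAux (mg : Int) (cur : List (List (String × Int))) (prev : List (String × Int)) :
    List (List (String × Int)) → List (List (List (String × Int)))
  | [] => [cur]
  | g :: t => if pvBrk mg prev g then cur :: pvSegAux mg [g] g t else pvSegAux mg (cur ++ [g]) g t

-- boundary positions of a list (Nat version of Source B's bounds interior)
def pvBreaks (mg : Int) : List (List (String × Int)) → List Nat
  | [] => []
  | [_] => []
  | p :: g :: t => (if pvBrk mg p g then [1] else []) ++ (pvBreaks mg (g :: t)).map (· + 1)

-- chop a list into chunks of the given sizes (consuming the list)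
def pvChop {α : Type} : List α → List Nat → List (List α)
  | _, [] => []
  | xs, d :: ds => xs.take d :: pvChop (xs.drop d) ds

-- consecutive differences
def pvDiffs : List Nat → List Nat
  | a :: b :: r => (b - a) :: pvDiffs (b :: r)
  | _ => []

theorem pvDiffs_shift : ∀ l : List Nat, pvDiffs (l.map (· + 1)) = pvDiffs l
  | [] => rfl
  | [_] => rfl
  | a :: b :: r => by
    simp only [List.map_cons, pvDiffs, Nat.succ_sub_succ]
    exact congrArg _ (pvDiffs_shift (b :: r))

theorem pvDiffs_bump (l : List Nat) (m : Nat) :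
    pvDiffs (0 :: (l.map (· + 1) ++ [m + 1]))
      = ((pvDiffs (0 :: (l ++ [m]))).headI + 1) :: (pvDiffs (0 :: (l ++ [m]))).tail := by
  cases l with
  | nil => simp [pvDiffs]
  | cons b r =>
    have h1 : (b + 1) :: (r.map (· + 1) ++ [m + 1]) = ((b :: (r ++ [m])).map (· + 1)) := by simp
    simp only [List.map_cons, List.cons_append, pvDiffs, Nat.sub_zero]
    rw [h1, pvDiffs_shift (b :: (r ++ [m]))]
    simp [pvDiffs]

theorem pvDiffs_cons_shift (l : List Nat) (m : Nat) :
    pvDiffs (0 :: 1 :: (l.map (· + 1) ++ [m + 1])) = 1 :: pvDiffs (0 :: (l ++ [m])) := by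
  have key : (1 : Nat) :: (l.map (· + 1) ++ [m + 1]) = ((0 :: (l ++ [m])).map (· + 1)) := by simp
  simp only [pvDiffs, Nat.sub_zero]
  rw [key, pvDiffs_shift]

-- prepending to the pending segment prepends to the first emitted segment
theorem pvSegAux_cons (mg : Int) :
    ∀ (t : List (List (String × Int))) (prev : List (String × Int)) (cur : List (List (String × Int)))
      (x : List (String × Int)),
      pvSegAux mg (x :: cur) prev t
        = (x :: (pvSegAux mg cur prev t).headI) :: (pvSegAux mg cur prev t).tail := by
  intro t
  induction t with
  | nil => intro prev cur x; simp [pvSegAux]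
  | cons g t ih =>
    intro prev cur x
    by_cases hb : pvBrk mg prev g
    · simp [pvSegAux, hb]
    · simpa [pvSegAux, hb] using ih g (cur ++ [g]) x

-- chopping at the boundary positions is the segmentation
theorem pvChop_seg (mg : Int) :
    ∀ (t : List (List (String × Int))) (g : List (String × Int)),
      pvChop (g :: t) (pvDiffs (0 :: (pvBreaks mg (g :: t) ++ [(g :: t).length])))
        = pvSegAux mg [g] g t := by
  intro t
  induction t with
  | nil => intro g; simp [pvBreaks, pvDiffs, pvChop, pvSegAux]
  | cons h t' ih =>
    intro g
    have hlen : (g :: h :: t').length = (h :: t').length + 1 := rfl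
    by_cases hb : pvBrk mg g h
    · have hbr : pvBreaks mg (g :: h :: t') = 1 :: (pvBreaks mg (h :: t')).map (· + 1) := by
        simp [pvBreaks, hb]
      rw [hbr, hlen]
      have h3 : (1 :: (pvBreaks mg (h :: t')).map (· + 1)) ++ [(h :: t').length + 1]
          = 1 :: ((pvBreaks mg (h :: t')).map (· + 1) ++ [(h :: t').length + 1]) := by
        simp
      rw [h3, pvDiffs_cons_shift]
      simp only [pvChop, List.take_succ_cons, List.take_zero, List.drop_succ_cons, List.drop_zero]
      rw [ih h]
      simp [pvSegAux, hb]
    · have hbr : pvBreaks mg (g :: h :: t') = (pvBreaks mg (h :: t')).map (· + 1) := by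
        simp [pvBreaks, hb]
      rw [hbr, hlen, pvDiffs_bump]
      obtain ⟨d, ds, hd⟩ : ∃ d ds, pvDiffs (0 :: (pvBreaks mg (h :: t') ++ [(h :: t').length])) = d :: ds := by
        cases hpb : pvBreaks mg (h :: t') with
        | nil => exact ⟨_, _, rfl⟩
        | cons b r => exact ⟨_, _, rfl⟩
      rw [hd]
      have hih := ih h
      rw [hd] at hih
      simp only [pvChop] at hih ⊢
      simp only [List.headI, List.tail_cons]
      have htake : (g :: h :: t').take (d + 1) = g :: (h :: t').take d := rfl
      have hdrop : (g :: h :: t').drop (d + 1) = (h :: t').drop d := rfl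
      rw [htake, hdrop]
      have hseg : pvSegAux mg [g] g (h :: t') = pvSegAux mg (g :: [h]) h t' := by
        simp [pvSegAux, hb]
      rw [hseg, pvSegAux_cons]
      rw [← hih]
      simp

-- the headAnom-filtered segmentation is A's reference clustering
theorem pvSeg_ref (mg : Int) :
    ∀ (t : List (List (String × Int))) (prev : List (String × Int)) (cur : List (List (String × Int))),
      cur.getLast? = some prev →
      ((pvAnom prev = true ∧ ∀ x ∈ cur, pvAnom x = true) ∨ (pvAnom prev = false ∧ cur = [prev])) →
      (pvSegAux mg cur prev t).filter pvHeadAnom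
        = pvRef mg (if pvAnom prev then cur else []) t := by
  intro t
  induction t with
  | nil =>
    intro prev cur hlast hinv
    rcases hinv with ⟨ha, hall⟩ | ⟨ha, hc⟩
    · have hcur : cur ≠ [] := by rintro rfl; simp at hlast
      obtain ⟨c0, ct, rfl⟩ : ∃ c0 ct, cur = c0 :: ct := by
        cases cur with | nil => exact absurd rfl hcur | cons c0 ct => exact ⟨c0, ct, rfl⟩
      simp [pvSegAux, pvHeadAnom, ha, hall c0 (by simp), pvRef]
    · subst hc
      simp [pvSegAux, pvHeadAnom, ha, pvRef]
  | cons g t ih =>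
    intro prev cur hlast hinv
    have hlastend : pvAnom prev = true → pvLastEnd cur = pvGet prev "end" 0 := by
      intro _; simp [pvLastEnd, hlast]
    rcases hinv with ⟨ha, hall⟩ | ⟨ha, hc⟩
    · have hcur : cur ≠ [] := by rintro rfl; simp at hlast
      cases hag : pvAnom g with
      | false =>
        have hb : pvBrk mg prev g = true := by simp [pvBrk, hag]
        have hhead : pvHeadAnom cur = true := by
          obtain ⟨c0, ct, rfl⟩ : ∃ c0 ct, cur = c0 :: ct := by
            cases cur with | nil => exact absurd rfl hcur | cons c0 ct => exact ⟨c0, ct, rfl⟩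
          simpa [pvHeadAnom] using hall c0 (by simp)
        simp only [pvSegAux, hb, if_true, List.filter_cons, hhead]
        rw [ih g [g] (by simp) (Or.inr ⟨by simpa using hag, rfl⟩)]
        simp [pvRef, hag, ha, hcur]
      | true =>
        by_cases hgap : pvGet g "start" 0 - pvLastEnd cur ≤ mg
        · have hb : pvBrk mg prev g = false := by
            simp [pvBrk, ha, hag]
            rw [hlastend ha] at hgap; omega
          simp only [pvSegAux, hb, Bool.false_eq_true, if_false]
          rw [ih g (cur ++ [g]) (by simp) (Or.inl ⟨hag, by
            intro x hx
            rcases List.mem_append.mp hx with hx | hx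
            · exact hall x hx
            · simp at hx; subst hx; exact hag⟩)]
          simp [pvRef, hag, ha, hcur, hgap]
        · have hb : pvBrk mg prev g = true := by
            simp [pvBrk, ha, hag]
            rw [hlastend ha] at hgap; omega
          have hhead : pvHeadAnom cur = true := by
            obtain ⟨c0, ct, rfl⟩ : ∃ c0 ct, cur = c0 :: ct := by
              cases cur with | nil => exact absurd rfl hcur | cons c0 ct => exact ⟨c0, ct, rfl⟩
            simpa [pvHeadAnom] using hall c0 (by simp)
          simp only [pvSegAux, hb, if_true, List.filter_cons, hhead]
          rw [ih g [g] (by simp) (Or.inl ⟨hag, by intro x hx; simp at hx; subst hx; exact hag⟩)]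
          simp [pvRef, hag, ha, hcur, hgap]
    · subst hc
      have hb : pvBrk mg prev g = true := by simp [pvBrk, ha]
      simp only [pvSegAux, hb, if_true, List.filter_cons]
      have hhead : pvHeadAnom [prev] = false := by simp [pvHeadAnom, ha]
      rw [hhead]
      cases hag : pvAnom g with
      | false =>
        rw [ih g [g] (by simp) (Or.inr ⟨by simpa using hag, rfl⟩)]
        simp [pvRef, hag, ha]
      | true =>
        rw [ih g [g] (by simp) (Or.inl ⟨hag, by intro x hx; simp at hx; subst hx; exact hag⟩)]
        simp [pvRef, hag, ha]

-- filter/map interchange, pointwise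
theorem pvFilterMap {α β : Type} (l : List α) (f : α → β) (p : α → Bool) (q : β → Bool)
    (h : ∀ x ∈ l, p x = q (f x)) : (l.filter p).map f = (l.map f).filter q := by
  induction l with
  | nil => rfl
  | cons a l ih =>
    have ha := h a (by simp)
    have ih' := ih (fun x hx => h x (by simp [hx]))
    cases hp : p a
    · rw [hp] at ha
      simp [List.filter_cons, hp, ha.symm, ih']
    · rw [hp] at ha
      simp [List.filter_cons, hp, ha.symm, ih']

-- zip-with-tail of the bounds list is the chop by consecutive differences
theorem pvZipChop {α : Type} :
    ∀ (bl : List Nat) (a : Nat) (xs : List α), (a :: bl).Pairwise (· ≤ ·) →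
      ((a :: bl).zip bl).map (fun ab => (xs.drop ab.1).take (ab.2 - ab.1))
        = pvChop (xs.drop a) (pvDiffs (a :: bl)) := by
  intro bl
  induction bl with
  | nil => intro a xs _; simp [pvDiffs, pvChop]
  | cons b r ih =>
    intro a xs hch
    have hab : a ≤ b := (List.pairwise_cons.mp hch).1 b (by simp)
    have hch' : (b :: r).Pairwise (· ≤ ·) := (List.pairwise_cons.mp hch).2
    simp only [List.zip_cons_cons, List.map_cons, pvDiffs, pvChop]
    rw [ih b xs hch']
    have hdd : (xs.drop a).drop (b - a) = xs.drop b := by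
      rw [List.drop_drop]
      have : a + (b - a) = b := by omega
      rw [this]
    rw [hdd]

-- membership bounds for the boundary positions
theorem pvBreaks_bounds (mg : Int) :
    ∀ (u : List (List (String × Int))), (pvBreaks mg u).Pairwise (· < ·)
      ∧ ∀ x ∈ pvBreaks mg u, 1 ≤ x ∧ x + 1 ≤ u.length
  | [] => by simp [pvBreaks]
  | [g] => by simp [pvBreaks]
  | p :: g :: t => by
    obtain ⟨hpw, hb⟩ := pvBreaks_bounds mg (g :: t)
    constructor
    · by_cases hbrk : pvBrk mg p g
      · simp only [pvBreaks, hbrk, if_true]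
        refine List.pairwise_append.mpr ⟨by simp, List.Pairwise.map _ (fun a b h => by omega) hpw, ?_⟩
        intro x hx y hy
        simp at hx
        subst hx
        obtain ⟨z, hz, rfl⟩ := List.mem_map.mp hy
        have := (hb z hz).1
        omega
      · simp only [pvBreaks, hbrk, Bool.false_eq_true, if_false, List.nil_append]
        exact List.Pairwise.map _ (fun a b h => by omega) hpw
    · intro x hx
      by_cases hbrk : pvBrk mg p g
      · simp only [pvBreaks, hbrk, if_true, List.mem_append, List.mem_singleton,
          List.mem_map] at hx
        rcases hx with rfl | ⟨z, hz, rfl⟩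
        · simp only [List.length_cons]; omega
        · have := hb z hz
          simp only [List.length_cons] at this ⊢
          omega
      · simp only [pvBreaks, hbrk, Bool.false_eq_true, if_false, List.nil_append,
          List.mem_map] at hx
        obtain ⟨z, hz, rfl⟩ := hx
        have := hb z hz
        simp only [List.length_cons] at this ⊢
        omega

-- adjacent pairs of a strictly sorted bounded list
theorem pvPairsFacts (n : Nat) :
    ∀ (L : List Nat) (a : Nat), (a :: L).Pairwise (· < ·) → (∀ x ∈ L, x ≤ n) →
      ∀ p ∈ (a :: L).zip L, p.1 < p.2 ∧ p.2 ≤ n := by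
  intro L
  induction L with
  | nil => intro a _ _ p hp; simp at hp
  | cons b r ih =>
    intro a hpw hle p hp
    simp only [List.zip_cons_cons, List.mem_cons] at hp
    rcases hp with rfl | hp
    · exact ⟨(List.pairwise_cons.mp hpw).1 b (by simp), hle b (by simp)⟩
    · exact ih b (List.pairwise_cons.mp hpw).2 (fun x hx => hle x (by simp [hx])) p hp

-- bridge: the port's enumerate/filter/map boundary list is pvBreaks (cast to Int, shifted by the start)
theorem pvEnumBreaks (mg : Int) :
    ∀ (u : List (List (String × Int))) (st : Int),
      ((PySem.List.enumerate (u.zip u.tail) st).filter (fun x => pvBrk mg x.2.1 x.2.2)).map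
          (fun x => x.1 + 1)
        = (pvBreaks mg u).map (fun n : Nat => (n : Int) + st)
  | [], st => by simp [pvBreaks, PySem.List.enumerate_nil]
  | [g], st => by simp [pvBreaks, PySem.List.enumerate_nil]
  | p :: g :: t, st => by
    have ih : ((PySem.List.enumerate ((g :: t).zip t) (st + 1)).filter
          (fun x => pvBrk mg x.2.1 x.2.2)).map (fun x => x.1 + 1)
        = (pvBreaks mg (g :: t)).map (fun n : Nat => (n : Int) + (st + 1)) := by
      simpa using pvEnumBreaks mg (g :: t) (st + 1)
    simp only [List.tail_cons, List.zip_cons_cons, PySem.List.enumerate_cons, List.filter_cons]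
    by_cases hbrk : pvBrk mg p g
    · simp only [hbrk, if_true, List.map_cons, pvBreaks, List.map_append, List.map_map, ih]
      refine List.cons_eq_cons.mpr ⟨by ring, ?_⟩
      apply List.map_congr_left
      intro x _
      simp only [Function.comp_apply]
      push_cast
      ring
    · simp only [hbrk, Bool.false_eq_true, if_false, pvBreaks, List.nil_append, List.map_map, ih]
      apply List.map_congr_left
      intro x _
      simp only [Function.comp_apply]
      push_cast
      ring

-- B's body on an arbitrary (already sorted) list, written out (zeta-reduced form of the port)
def pvBexpr (s : List (List (String × Int))) (mg mn : Int) : List (List (List (String × Int))) :=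
  ((([(0:Int)] ++ ((PySem.List.enumerate (s.zip (PySem.List.slice s (some 1) none))).filter
      (fun x : Int × (List (String × Int) × List (String × Int)) => pvBrk mg x.2.1 x.2.2)).map
      (fun x : Int × (List (String × Int) × List (String × Int)) => x.1 + 1) ++ [(s.length : Int)]).zip
    (([(0:Int)] ++ ((PySem.List.enumerate (s.zip (PySem.List.slice s (some 1) none))).filter
      (fun x : Int × (List (String × Int) × List (String × Int)) => pvBrk mg x.2.1 x.2.2)).map
      (fun x : Int × (List (String × Int) × List (String × Int)) => x.1 + 1) ++ [(s.length : Int)]).tail)).filter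
    (fun ab : Int × Int => decide (ab.1 < ab.2) && pvAnom (PySem.List.pyGetD s ab.1 []) && decide (mn ≤ ab.2 - ab.1))).map
  (fun ab : Int × Int => PySem.List.slice s (some ab.1) (some ab.2))

-- B's body computes the length-filtered reference clusters
theorem pvB_char (mg mn : Int) (s : List (List (String × Int))) :
    pvBexpr s mg mn = (pvRef mg [] s).filter (fun c => decide (mn ≤ (c.length : Int))) := by
  cases s with
  | nil =>
    simp [pvBexpr, pvRef, PySem.List.enumerate_nil, PySem.List.slice_from_one]
  | cons g t =>
    unfold pvBexpr
    rw [PySem.List.slice_from_one]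
    have hbr : ((PySem.List.enumerate ((g :: t).zip (g :: t).tail)).filter
          (fun x => pvBrk mg x.2.1 x.2.2)).map (fun x => x.1 + 1)
        = (pvBreaks mg (g :: t)).map (fun k : Nat => (k : Int)) := by
      simpa using pvEnumBreaks mg (g :: t) 0
    rw [hbr]
    have hbounds : ([(0:Int)] ++ (pvBreaks mg (g :: t)).map (fun k : Nat => (k : Int))
          ++ [((g :: t).length : Int)])
        = (0 :: (pvBreaks mg (g :: t) ++ [(g :: t).length])).map (fun k : Nat => (k : Int)) := by
      simp
    rw [hbounds]
    obtain ⟨hpwB, hbnd⟩ := pvBreaks_bounds mg (g :: t)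
    have hpw : (0 :: (pvBreaks mg (g :: t) ++ [(g :: t).length])).Pairwise (· < ·) := by
      refine List.pairwise_cons.mpr ⟨?_, ?_⟩
      · intro x hx
        rcases List.mem_append.mp hx with hx | hx
        · exact lt_of_lt_of_le Nat.zero_lt_one (hbnd x hx).1
        · simp at hx; subst hx; simp
      · refine List.pairwise_append.mpr ⟨hpwB, by simp, ?_⟩
        intro x hx y hy
        simp at hy; subst hy
        have h2 := (hbnd x hx).2
        simp only [List.length_cons] at h2 ⊢
        omega
    have hfacts := pvPairsFacts (g :: t).length (pvBreaks mg (g :: t) ++ [(g :: t).length]) 0 hpw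
      (by
        intro x hx
        rcases List.mem_append.mp hx with hx | hx
        · have h2 := (hbnd x hx).2; omega
        · simp at hx; subst hx; exact le_rfl)
    have htail : ((0 :: (pvBreaks mg (g :: t) ++ [(g :: t).length])).map (fun k : Nat => (k : Int))).tail
        = (pvBreaks mg (g :: t) ++ [(g :: t).length]).map (fun k : Nat => (k : Int)) := by simp
    rw [htail, List.zip_map, List.filter_map, List.map_map]
    rw [pvFilterMap ((0 :: (pvBreaks mg (g :: t) ++ [(g :: t).length])).zip
          (pvBreaks mg (g :: t) ++ [(g :: t).length]))
        ((fun ab => PySem.List.slice (g :: t) (some ab.1) (some ab.2)) ∘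
          Prod.map (fun k : Nat => (k : Int)) (fun k : Nat => (k : Int)))
        _ (fun c => pvHeadAnom c && decide (mn ≤ (c.length : Int)))
        ?_]
    · have hmapfun : ((0 :: (pvBreaks mg (g :: t) ++ [(g :: t).length])).zip
            (pvBreaks mg (g :: t) ++ [(g :: t).length])).map
            ((fun ab => PySem.List.slice (g :: t) (some ab.1) (some ab.2)) ∘
              Prod.map (fun k : Nat => (k : Int)) (fun k : Nat => (k : Int)))
          = ((0 :: (pvBreaks mg (g :: t) ++ [(g :: t).length])).zip
            (pvBreaks mg (g :: t) ++ [(g :: t).length])).map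
            (fun ab => ((g :: t).drop ab.1).take (ab.2 - ab.1)) := by
        apply List.map_congr_left
        intro ab _
        obtain ⟨a, b⟩ := ab
        simp [Function.comp, Prod.map, PySem.List.slice_natCast]
      rw [hmapfun]
      rw [pvZipChop (pvBreaks mg (g :: t) ++ [(g :: t).length]) 0 (g :: t)
          (hpw.imp le_of_lt)]
      simp only [List.drop_zero]
      rw [pvChop_seg mg t g]
      have hinv : (pvAnom g = true ∧ ∀ x ∈ [g], pvAnom x = true) ∨ (pvAnom g = false ∧ [g] = [g]) := by
        cases hag : pvAnom g
        · exact Or.inr ⟨rfl, rfl⟩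
        · exact Or.inl ⟨rfl, by intro x hx; simp at hx; subst hx; exact hag⟩
      have hseg : (pvSegAux mg [g] g t).filter pvHeadAnom = pvRef mg [] (g :: t) := by
        rw [pvSeg_ref mg t g [g] (by simp) hinv]
        cases hag : pvAnom g <;> simp [pvRef, hag]
      rw [← hseg, List.filter_filter]
      apply List.filter_congr
      intro c _
      exact Bool.and_comm _ _
    · intro ab hab
      obtain ⟨hlt, hle2⟩ := hfacts ab hab
      obtain ⟨a, b⟩ := ab
      simp only at hlt hle2
      have ha_lt : a < (g :: t).length := lt_of_lt_of_le hlt hle2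
      have hba : b - a = (b - a - 1) + 1 := by omega
      have hdrop : (g :: t).drop a = (g :: t)[a] :: (g :: t).drop (a + 1) :=
        List.drop_eq_getElem_cons ha_lt
      have hget : ((g :: t).getD a []) = (g :: t)[a] := List.getD_eq_getElem _ _ ha_lt
      have hchunk : ((g :: t).drop a).take (b - a)
          = (g :: t)[a] :: (((g :: t).drop (a + 1)).take (b - a - 1)) := by
        conv_lhs => rw [hdrop, hba, List.take_succ_cons]
      simp only [Function.comp_apply, Prod.map_apply, PySem.List.slice_natCast,
        PySem.List.pyGetD_natCast, hget, hchunk, pvHeadAnom,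
        List.length_cons, List.length_take, List.length_drop]
      simp only [List.length_cons] at ha_lt hle2
      have hlen : min (b - a - 1) (t.length + 1 - (a + 1)) + 1 = b - a := by omega
      have hcast : ((b - a : Nat) : Int) = (b : Int) - (a : Int) := by omega
      have hl2 : (a : Int) < (b : Int) := by exact_mod_cast hlt
      simp only [hlen, hcast]
      simp [hl2]
      rfl

-- the two ports agree on every input
theorem pv_main (gas : List (List (String × Int))) (mg mn : Int) :
    identify_genomic_islands gas mg mn = identify_genomic_islands_alt gas mg mn := by
  have hA : identify_genomic_islands gas mg mn
      = (pvRef mg [] (PySem.List.sorted gas (fun x => pvGet x "start" 0))).filter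
          (fun c => decide (mn ≤ (c.length : Int))) := by
    show (let st := (PySem.List.sorted gas (fun x => pvGet x "start" 0)).foldl (pvStepA mg mn) ([], [])
          if st.2 ≠ [] ∧ mn ≤ (st.2.length : Int) then st.1 ++ [st.2] else st.1) = _
    simpa using pvA_ref mg mn (PySem.List.sorted gas (fun x => pvGet x "start" 0)) [] []
  have hB : identify_genomic_islands_alt gas mg mn
      = pvBexpr (PySem.List.sorted gas (fun x => pvGet x "start" 0)) mg mn := rfl
  rw [hA, hB, pvB_char]

-- ===== VERDICT (by name: the statement is the Claim_ definition above) =====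
theorem identify_genomic_islands_spec : Claim_equal_identify_genomic_islands := by
  intro gas mg mn _ _
  unfold Spec_identify_genomic_islands
  exact pv_main gas mg mn
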